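-- pv_equiv track=rewrite | github.com/Hashem-Al-Qurashi/Sales-Ai-system- | production/api/hormozi_rag/core/chunker.py | _find_good_break_point
-- ===== SOURCE A (Python) =====
-- def _find_good_break_point(text: str, start: int, end: int) -> int:
--     """Find a good break point for chunking.
--
--     Args:
--         text: Text to search
--         start: Start position
--         end: Preferred end position
--
--     Returns:
--         Optimal break point
--     """
--     # Look for sentence endings within reasonable distance
--     search_start = max(start, end - 200)  # Don't go too far back
--
--     # Look for sentence endings
--     for pos in range(end, search_start, -1):
--         if pos < len(text) and text[pos] in '.!?':
--             # Make sure it's not an abbreviation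
--             if pos + 1 < len(text) and text[pos + 1] in ' \n':
--                 return pos + 1
--
--     # Look for paragraph breaks
--     for pos in range(end, search_start, -1):
--         if pos < len(text) and text[pos] == '\n':
--             if pos + 1 < len(text) and text[pos + 1] == '\n':
--                 return pos + 1
--
--     # Fallback to original end
--     return end
-- ===== SOURCE B (Python) =====
-- def _find_good_break_point(text: str, start: int, end: int) -> int:
--     """Single backward pass: return at the first sentence ending; remember the
--     first paragraph break seen and use it only if no sentence ending exists."""
--     search_start = max(start, end - 200)
--     n = len(text)
--     para = None
--     for pos in range(end, search_start, -1):
--         if pos < n and pos + 1 < n: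
--             c, d = text[pos], text[pos + 1]
--             if c in '.!?' and d in ' \n':
--                 return pos + 1
--             if para is None and c == '\n' and d == '\n':
--                 para = pos + 1
--     return para if para is not None else end
-- ===== Notes on version B (the rewrite author's own statement) =====
-- stated objective: simpler
-- what changed: The two separate backward scans (one for sentence endings, one for paragraph breaks) are fused into a single backward pass that returns immediately on a sentence ending and remembers the first paragraph break as a fallback.
-- outside the precondition, e.g. on _find_good_break_point('x. ', -100, 2): A returns 2, B returns 2
import Mathlib
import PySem

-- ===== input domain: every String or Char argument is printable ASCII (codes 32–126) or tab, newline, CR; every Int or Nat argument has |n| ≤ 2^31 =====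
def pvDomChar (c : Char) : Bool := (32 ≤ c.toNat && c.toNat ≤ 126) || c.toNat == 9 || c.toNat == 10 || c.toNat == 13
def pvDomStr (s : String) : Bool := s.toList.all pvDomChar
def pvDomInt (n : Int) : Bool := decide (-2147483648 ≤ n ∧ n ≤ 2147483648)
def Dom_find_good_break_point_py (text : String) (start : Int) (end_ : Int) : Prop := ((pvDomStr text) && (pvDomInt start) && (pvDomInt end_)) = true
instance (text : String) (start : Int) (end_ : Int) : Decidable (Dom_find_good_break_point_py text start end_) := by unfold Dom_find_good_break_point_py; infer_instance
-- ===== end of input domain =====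

-- B fuses A's two backward scans into one backward pass that returns at the first
-- sentence ending and remembers the first paragraph break as a fallback (simpler, same cost).


-- ===== PORT A =====
-- first loop body: sentence ending followed by space/newline (none = this pos does not return)
def pvASent (s : List Char) (n : Int) (pos : Int) : Option Int :=
  if pos < n then
    match PySem.List.pyGet? s pos with
    | some c =>
      if c = '.' ∨ c = '!' ∨ c = '?' then
        if pos + 1 < n then
          match PySem.List.pyGet? s (pos + 1) with
          | some d => if d = ' ' ∨ d = '\n' then some (pos + 1) else none
          | none => none
        else none
      else none
    | none => none
  else none

-- second loop body: paragraph break '\n\n'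
def pvAPara (s : List Char) (n : Int) (pos : Int) : Option Int :=
  if pos < n then
    match PySem.List.pyGet? s pos with
    | some c =>
      if c = '\n' then
        if pos + 1 < n then
          match PySem.List.pyGet? s (pos + 1) with
          | some d => if d = '\n' then some (pos + 1) else none
          | none => none
        else none
      else none
    | none => none
  else none

def find_good_break_point_py (text : String) (start : Int) (end_ : Int) : Int :=
  let s := text.toList
  let search_start := max start (end_ - 200)
  let n : Int := s.length
  let r := PySem.List.pyRange end_ search_start (-1)
  match r.findSome? (pvASent s n) with
  | some v => v
  | none =>
    match r.findSome? (pvAPara s n) with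
    | some v => v
    | none => end_

-- ===== PORT B =====
-- one backward pass: return at a sentence ending, remember the first paragraph break
def pvBLoop (s : List Char) (n : Int) (end_ : Int) : List Int → Option Int → Int
  | [], para => para.getD end_
  | pos :: rest, para =>
    if pos < n ∧ pos + 1 < n then
      match PySem.List.pyGet? s pos, PySem.List.pyGet? s (pos + 1) with
      | some c, some d =>
        if (c = '.' ∨ c = '!' ∨ c = '?') ∧ (d = ' ' ∨ d = '\n') then pos + 1
        else pvBLoop s n end_ rest (if para = none ∧ c = '\n' ∧ d = '\n' then some (pos + 1) else para)
      | _, _ => pvBLoop s n end_ rest para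
    else pvBLoop s n end_ rest para

def find_good_break_point_py_alt (text : String) (start : Int) (end_ : Int) : Int :=
  let s := text.toList
  let search_start := max start (end_ - 200)
  let n : Int := s.length
  pvBLoop s n end_ (PySem.List.pyRange end_ search_start (-1)) none

-- ===== PRECONDITION & SPEC =====
-- Pre_ excludes inputs whose backward scan reaches an index below -len(text): there
-- Python A raises IndexError (negative indexing out of range), except when an early
-- sentence-ending return happens first — those rare early returns are also excluded.
def Pre_find_good_break_point_py (text : String) (start : Int) (end_ : Int) : Prop :=
  end_ ≤ max start (end_ - 200) ∨ -(text.toList.length : Int) ≤ max start (end_ - 200) + 1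

instance (text : String) (start : Int) (end_ : Int) : Decidable (Pre_find_good_break_point_py text start end_) := by
  unfold Pre_find_good_break_point_py; infer_instance

def pvWitness_find_good_break_point_py : String × Int × Int := ("ab. cd\n\nx", 0, 7)

def Spec_find_good_break_point_py (text : String) (start : Int) (end_ : Int) (out : Int) : Prop := out = find_good_break_point_py_alt text start end_
instance (text : String) (start : Int) (end_ : Int) (out : Int) : Decidable (Spec_find_good_break_point_py text start end_ out) := by unfold Spec_find_good_break_point_py; infer_instance

-- ===== CLAIM (what is proved, stated in full; the proofs are below) =====
def Claim_equal_find_good_break_point_py : Prop := ∀ (text : String) (start : Int) (end_ : Int), Dom_find_good_break_point_py text start end_ → Pre_find_good_break_point_py text start end_ → Spec_find_good_break_point_py text start end_ (find_good_break_point_py text start end_)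

-- ===== LEMMAS AND PROOFS =====

-- all accessed indices are ≥ -len, so pyGet? succeeds exactly when the 'pos < n' guard holds
lemma pvGet_some (s : List Char) (pos : Int) (h1 : -(s.length : Int) ≤ pos) (h2 : pos < (s.length : Int)) :
    ∃ c, PySem.List.pyGet? s pos = some c := by
  have h := (PySem.List.pyGet?_eq_none_iff (xs := s) (i := pos))
  cases hc : PySem.List.pyGet? s pos with
  | some c => exact ⟨c, rfl⟩
  | none =>
    exfalso
    have := h.mp hc
    exact this ⟨h1, h2⟩

-- B's single pass equals A's two passes, for any traversal list whose elements are ≥ -len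
lemma pvBLoop_eq (s : List Char) (end_ : Int) :
    ∀ (L : List Int) (para : Option Int),
      (∀ pos ∈ L, -(s.length : Int) ≤ pos) →
      pvBLoop s (s.length : Int) end_ L para =
        match L.findSome? (pvASent s (s.length : Int)) with
        | some v => v
        | none =>
          match para with
          | some w => w
          | none =>
            match L.findSome? (pvAPara s (s.length : Int)) with
            | some v => v
            | none => end_ := by
  intro L
  induction L with
  | nil =>
    intro para _
    cases para <;> simp [pvBLoop, Option.getD]
  | cons pos rest ih =>
    intro para hmem
    have hpos : -(s.length : Int) ≤ pos := hmem pos (by simp)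
    have hrest : ∀ p ∈ rest, -(s.length : Int) ≤ p := fun p hp => hmem p (by simp [hp])
    by_cases hg : pos < (s.length : Int) ∧ pos + 1 < (s.length : Int)
    · obtain ⟨c, hc⟩ := pvGet_some s pos hpos hg.1
      obtain ⟨d, hd⟩ := pvGet_some s (pos + 1) (by omega) hg.2
      by_cases hsent : (c = '.' ∨ c = '!' ∨ c = '?') ∧ (d = ' ' ∨ d = '\n')
      · -- sentence ending: both return pos+1
        have hA : pvASent s (s.length : Int) pos = some (pos + 1) := by
          simp [pvASent, hg.1, hg.2, hc, hd, hsent.1, hsent.2]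
        simp [pvBLoop, hg, hc, hd, hsent, List.findSome?, hA]
      · -- no sentence ending here
        have hA : pvASent s (s.length : Int) pos = none := by
          simp only [pvASent, hg.1, if_true, hc, hg.2]
          by_cases h1 : c = '.' ∨ c = '!' ∨ c = '?'
          · have h2 : ¬ (d = ' ' ∨ d = '\n') := fun h2 => hsent ⟨h1, h2⟩
            simp [h1, hd, h2]
          · simp [h1]
        have hP : pvAPara s (s.length : Int) pos =
            (if c = '\n' ∧ d = '\n' then some (pos + 1) else none) := by
          by_cases h1 : c = '\n'
          · by_cases h2 : d = '\n' <;> simp [pvAPara, hg.1, hg.2, hc, hd, h1, h2]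
          · simp [pvAPara, hg.1, hc, h1]
        have step : pvBLoop s (s.length : Int) end_ (pos :: rest) para =
            pvBLoop s (s.length : Int) end_ rest
              (if para = none ∧ c = '\n' ∧ d = '\n' then some (pos + 1) else para) := by
          simp [pvBLoop, hg, hc, hd, hsent]
        rw [step, ih _ hrest]
        simp only [List.findSome?, hA, hP]
        cases para with
        | some w => simp
        | none =>
          by_cases hpp : c = '\n' ∧ d = '\n' <;> simp [hpp]
    · -- guard fails: this pos contributes nothing on either side
      have hA : pvASent s (s.length : Int) pos = none := by
        by_cases h1 : pos < (s.length : Int)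
        · have h2 : ¬ pos + 1 < (s.length : Int) := fun h2 => hg ⟨h1, h2⟩
          obtain ⟨c, hc⟩ := pvGet_some s pos hpos h1
          by_cases h3 : c = '.' ∨ c = '!' ∨ c = '?' <;> simp [pvASent, h1, h2, hc, h3]
        · simp [pvASent, h1]
      have hP : pvAPara s (s.length : Int) pos = none := by
        by_cases h1 : pos < (s.length : Int)
        · have h2 : ¬ pos + 1 < (s.length : Int) := fun h2 => hg ⟨h1, h2⟩
          obtain ⟨c, hc⟩ := pvGet_some s pos hpos h1
          by_cases h3 : c = '\n' <;> simp [pvAPara, h1, h2, hc, h3]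
        · simp [pvAPara, h1]
      have step : pvBLoop s (s.length : Int) end_ (pos :: rest) para =
          pvBLoop s (s.length : Int) end_ rest para := by
        simp [pvBLoop, hg]
      rw [step, ih _ hrest]
      simp [List.findSome?, hA, hP]

-- ===== VERDICT (by name: the statement is the Claim_ definition above) =====
theorem find_good_break_point_py_spec : Claim_equal_find_good_break_point_py := by
  intro text start end_ _ hpre
  unfold Pre_find_good_break_point_py at hpre
  unfold Spec_find_good_break_point_py find_good_break_point_py find_good_break_point_py_alt
  have hmem : ∀ pos ∈ PySem.List.pyRange end_ (max start (end_ - 200)) (-1),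
      -(text.toList.length : Int) ≤ pos := by
    intro pos hp
    have hm := (PySem.List.mem_pyRange_neg_one (a := end_) (b := max start (end_ - 200)) (x := pos)).mp hp
    rcases hpre with h | h
    · rw [PySem.List.pyRange_neg_one_eq_nil h] at hp; cases hp
    · omega
  exact (pvBLoop_eq text.toList end_ _ none hmem).symm
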